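-- pv_equiv track=rewrite | github.com/NAG2020/VisualPytorch | VisualPytorch/NeuralNetwork/translate/ops.py | find_start_id
-- ===== SOURCE A (Python) =====
-- def find_start_id(nets):
--     one_start = True
--     start_id = None
--
--     for key in nets:
--     	if nets[key]['name'] == 'start':
--     		if start_id is not None:
--     			one_start = False
--     		start_id = key
--
--     return start_id, one_start
-- ===== SOURCE B (Python) =====
-- def find_start_id(nets):
--     # alternative decomposition: reverse scan for the last 'start' key, plus a count pass
--     start_id = None
--     for key in reversed(list(nets)):
--         if nets[key]['name'] == 'start':
--             start_id = key
--             break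
--     count = sum(1 for v in nets.values() if v['name'] == 'start')
--     return start_id, count <= 1
-- ===== Notes on version B (the rewrite author's own statement) =====
-- stated objective: alternative
-- what changed: A's single fused pass that overwrites start_id and maintains a uniqueness flag is replaced by a backward scan that stops at the last 'start' key plus an independent counting pass deciding uniqueness.
import Mathlib
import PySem

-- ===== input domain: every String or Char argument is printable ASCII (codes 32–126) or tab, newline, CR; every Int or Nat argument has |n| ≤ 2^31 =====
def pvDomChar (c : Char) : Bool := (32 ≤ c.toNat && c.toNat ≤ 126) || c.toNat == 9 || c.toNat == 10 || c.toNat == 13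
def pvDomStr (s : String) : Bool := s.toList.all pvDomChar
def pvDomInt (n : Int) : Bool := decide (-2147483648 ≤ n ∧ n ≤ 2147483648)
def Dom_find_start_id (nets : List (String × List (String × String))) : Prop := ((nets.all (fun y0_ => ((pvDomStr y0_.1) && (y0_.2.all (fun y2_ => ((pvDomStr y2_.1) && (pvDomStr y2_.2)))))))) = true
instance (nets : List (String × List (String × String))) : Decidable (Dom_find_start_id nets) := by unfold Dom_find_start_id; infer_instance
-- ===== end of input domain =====

-- B changes A's fused overwrite-and-flag pass into a backward scan for the last 'start' key plus a separate counting pass (alternative decomposition, same cost).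

-- ===== PORT A =====
-- nets[key]['name'] : dict lookups (first match); none = KeyError, excluded by Pre_
def pvLookupName (nets : List (String × List (String × String))) (k : String) : Option String :=
  ((PySem.Dict.mk nets).get? k).bind (fun v => (PySem.Dict.mk v).get? "name")

def find_start_id (nets : List (String × List (String × String))) : Option String × Bool :=
  -- state (start_id, one_start), initialised (None, True); 'for key in nets' iterates the keys
  let st := (nets.map (·.1)).foldl
    (fun (st : Option String × Bool) key =>
      if pvLookupName nets key == some "start" then
        (some key, if st.1.isSome then false else st.2)
      else st)
    ((none : Option String), true)
  (st.1, st.2)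

-- ===== PORT B =====
-- for key in reversed(list(nets)): if nets[key]['name'] == 'start': start_id = key; break
def pvRevScan (nets : List (String × List (String × String))) : List String → Option String
  | [] => none
  | k :: rest => if pvLookupName nets k == some "start" then some k else pvRevScan nets rest

def find_start_id_alt (nets : List (String × List (String × String))) : Option String × Bool :=
  let start_id := pvRevScan nets (nets.map (·.1)).reverse
  -- count = sum(1 for v in nets.values() if v['name'] == 'start')
  let count := nets.foldl
    (fun (c : Int) kv => if (PySem.Dict.mk kv.2).get? "name" == some "start" then c + 1 else c) 0
  (start_id, decide (count ≤ 1))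

-- ===== PRECONDITION & SPEC =====
-- Pre_ excludes association lists with duplicate outer keys (not representable as the Python dict A iterates)
-- and entries whose value has no 'name' key (there A raises KeyError).
def Pre_find_start_id (nets : List (String × List (String × String))) : Prop :=
  (nets.map (·.1)).Nodup ∧ ∀ kv ∈ nets, "name" ∈ kv.2.map (·.1)
instance (nets : List (String × List (String × String))) : Decidable (Pre_find_start_id nets) := by unfold Pre_find_start_id; infer_instance

def pvWitness_find_start_id : (List (String × List (String × String))) :=
  [("a", [("name", "start")]), ("b", [("name", "conv")])]

def Spec_find_start_id (nets : List (String × List (String × String))) (out : Option String × Bool) : Prop := out = find_start_id_alt nets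
instance (nets : List (String × List (String × String))) (out : Option String × Bool) : Decidable (Spec_find_start_id nets out) := by unfold Spec_find_start_id; infer_instance

-- ===== CLAIM (what is proved, stated in full; the proofs are below) =====
def Claim_equal_find_start_id : Prop := ∀ (nets : List (String × List (String × String))), Dom_find_start_id nets → Pre_find_start_id nets → Spec_find_start_id nets (find_start_id nets)

-- ===== LEMMAS AND PROOFS =====

-- the match predicate on a (key, value) pair, independent of the surrounding dict
def pvMatch (kv : String × List (String × String)) : Bool :=
  (PySem.Dict.mk kv.2).get? "name" == some "start"

-- under Nodup outer keys, looking a key of nets up in nets gives that pair's value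
theorem pvLookup_eq (nets : List (String × List (String × String)))
    (hnd : (nets.map (·.1)).Nodup) (kv : String × List (String × String)) (hmem : kv ∈ nets) :
    pvLookupName nets kv.1 = (PySem.Dict.mk kv.2).get? "name" := by
  have h : (PySem.Dict.mk nets).get? kv.1 = some kv.2 :=
    PySem.Dict.get?_of_mem_items (d := PySem.Dict.mk nets) hmem hnd
  simp [pvLookupName, h]

-- A's loop over any sublist l of pairs whose keys look up to their own values
theorem foldlA_spec (nets : List (String × List (String × String)))
    (l : List (String × List (String × String)))
    (hl : ∀ kv ∈ l, pvLookupName nets kv.1 = (PySem.Dict.mk kv.2).get? "name")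
    (st : Option String × Bool) :
    (l.map (·.1)).foldl
      (fun (st : Option String × Bool) key =>
        if pvLookupName nets key == some "start" then
          (some key, if st.1.isSome then false else st.2)
        else st) st
    = (((l.reverse.find? pvMatch).map (·.1)).or st.1,
        st.2 && ((l.countP pvMatch == 0) || (l.countP pvMatch == 1 && st.1 == none))) := by
  induction l generalizing st with
  | nil => simp
  | cons kv t ih =>
    have hkv := hl kv (by simp)
    have ht : ∀ p ∈ t, pvLookupName nets p.1 = (PySem.Dict.mk p.2).get? "name" := by
      intro p hp; exact hl p (by simp [hp])
    by_cases hm : pvMatch kv = true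
    · simp only [List.map_cons, List.foldl_cons, hkv]
      rw [if_pos (by simpa [pvMatch] using hm)]
      rw [ih ht]
      rw [List.countP_cons_of_pos (by simpa [pvMatch] using hm)]
      rw [show (kv :: t).reverse = t.reverse ++ [kv] by simp]
      rw [List.find?_append]
      cases hf : t.reverse.find? pvMatch with
      | none =>
        have hc : t.countP pvMatch = 0 := by
          rw [List.countP_eq_zero]
          intro a ha
          have := List.find?_eq_none.mp hf a (by simpa using ha)
          simpa using this
        simp [hm, hc, Option.or]
        cases h1 : st.1 <;> simp
      | some p =>
        have hc : 1 ≤ t.countP pvMatch := by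
          have hp := List.find?_some hf
          have hpm : p ∈ t := by
            have := List.mem_of_find?_eq_some hf; simpa using this
          exact List.countP_pos_iff.mpr ⟨p, hpm, hp⟩
        have h0 : (t.countP pvMatch == 0) = false := by
          rw [beq_eq_false_iff_ne]; omega
        have h1 : (t.countP pvMatch + 1 == 0) = false := by
          rw [beq_eq_false_iff_ne]; omega
        have h2 : (t.countP pvMatch + 1 == 1) = (t.countP pvMatch == 0) := by
          rcases t.countP pvMatch with _ | n <;> simp
        simp [Option.or, h0, h1, h2]
    · have hm' : pvMatch kv = false := by simpa using hm
      simp only [List.map_cons, List.foldl_cons, hkv]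
      rw [if_neg (by simpa [pvMatch] using hm)]
      rw [ih ht]
      rw [List.countP_cons_of_neg (by simp [hm'])]
      rw [show (kv :: t).reverse = t.reverse ++ [kv] by simp]
      rw [List.find?_append]
      cases hf : t.reverse.find? pvMatch with
      | none => simp [hm']
      | some p => simp

-- B's reverse scan over the keys of l equals find? over l itself
theorem revScan_spec (nets : List (String × List (String × String)))
    (l : List (String × List (String × String)))
    (hl : ∀ kv ∈ l, pvLookupName nets kv.1 = (PySem.Dict.mk kv.2).get? "name") :
    pvRevScan nets (l.map (·.1)) = (l.find? pvMatch).map (·.1) := by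
  induction l with
  | nil => simp [pvRevScan]
  | cons kv t ih =>
    have hkv := hl kv (by simp)
    have ht : ∀ p ∈ t, pvLookupName nets p.1 = (PySem.Dict.mk p.2).get? "name" := by
      intro p hp; exact hl p (by simp [hp])
    by_cases hm : pvMatch kv = true
    · simp only [List.map_cons, pvRevScan, hkv]
      rw [if_pos (by simpa [pvMatch] using hm)]
      rw [List.find?_cons_of_pos hm]
      simp
    · have hm' : pvMatch kv = false := by simpa using hm
      simp only [List.map_cons, pvRevScan, hkv]
      rw [if_neg (by simpa [pvMatch] using hm)]
      rw [List.find?_cons_of_neg (by simp [hm'])]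
      exact ih ht

-- B's counting fold is countP
theorem count_spec (l : List (String × List (String × String))) (c : Int) :
    l.foldl (fun (c : Int) kv => if (PySem.Dict.mk kv.2).get? "name" == some "start" then c + 1 else c) c
    = c + l.countP pvMatch := by
  induction l generalizing c with
  | nil => simp
  | cons kv t ih =>
    by_cases hm : pvMatch kv = true
    · simp only [List.foldl_cons]
      rw [if_pos (by simpa [pvMatch] using hm)]
      rw [ih, List.countP_cons_of_pos hm]
      push_cast; ring
    · have hm' : pvMatch kv = false := by simpa using hm
      simp only [List.foldl_cons]
      rw [if_neg (by simpa [pvMatch] using hm)]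
      rw [ih, List.countP_cons_of_neg (by simp [hm'])]

-- ===== VERDICT (by name: the statement is the Claim_ definition above) =====
theorem find_start_id_spec : Claim_equal_find_start_id := by
  intro nets _hdom hpre
  obtain ⟨hnd, _⟩ := hpre
  have hl : ∀ kv ∈ nets, pvLookupName nets kv.1 = (PySem.Dict.mk kv.2).get? "name" :=
    fun kv h => pvLookup_eq nets hnd kv h
  have hlr : ∀ kv ∈ nets.reverse, pvLookupName nets kv.1 = (PySem.Dict.mk kv.2).get? "name" := by
    intro kv h; exact hl kv (by simpa using h)
  show find_start_id nets = find_start_id_alt nets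
  unfold find_start_id find_start_id_alt
  rw [foldlA_spec nets nets hl, count_spec]
  rw [show (nets.map (·.1)).reverse = nets.reverse.map (·.1) by simp]
  rw [revScan_spec nets nets.reverse hlr]
  dsimp only
  simp only [Prod.mk.injEq]
  constructor
  · cases List.find? pvMatch nets.reverse <;> simp
  · simp only [zero_add]
    rcases hc : nets.countP pvMatch with _ | n
    · simp
    · rcases n with _ | n
      · simp
      · simp
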